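-- pv_equiv track=rewrite | github.com/EricMencarini/python_practices_datalemur | 02.medium/Data_Conference_Attendees.py | min_attendees
-- ===== SOURCE A (Python) =====
-- def min_attendees(answers):
--     total_answer = 0
--     d_answer = {}
--
--     for ans in answers:
--         if ans not in d_answer:
--             total_answer += ans + 1
--             d_answer[ans] = 1
--         else:
--             if d_answer[ans] < ans + 1:
--                 d_answer[ans] += 1
--             else:
--                 total_answer += ans + 1
--                 d_answer[ans] = 1
--     return total_answer
-- ===== SOURCE B (Python) =====
-- def min_attendees(answers):
--     counts = {}
--     for a in answers:
--         counts[a] = counts.get(a, 0) + 1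
--     total = 0
--     for v, n in counts.items():
--         cap = v + 1 if v + 1 > 1 else 1
--         total += ((n + cap - 1) // cap) * (v + 1)
--     return total
-- ===== Notes on version B (the rewrite author's own statement) =====
-- stated objective: simpler
-- what changed: Replaced the incremental group-filling state machine (running dict of partially filled groups) with a frequency count followed by a closed-form per-value computation ceil(n/cap)*(v+1) with cap = max(1, v+1).
import Mathlib
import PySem

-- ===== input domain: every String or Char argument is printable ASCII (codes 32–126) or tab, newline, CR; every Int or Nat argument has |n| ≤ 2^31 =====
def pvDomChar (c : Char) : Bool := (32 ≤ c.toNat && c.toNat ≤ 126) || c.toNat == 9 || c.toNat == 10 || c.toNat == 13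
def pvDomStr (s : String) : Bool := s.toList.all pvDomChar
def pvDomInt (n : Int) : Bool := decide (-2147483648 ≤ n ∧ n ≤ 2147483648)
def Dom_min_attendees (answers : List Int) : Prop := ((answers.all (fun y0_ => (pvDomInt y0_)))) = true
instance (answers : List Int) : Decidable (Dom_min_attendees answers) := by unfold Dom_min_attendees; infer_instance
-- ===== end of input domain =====

-- B replaces A's incremental group-filling state machine with a frequency count plus a
-- closed-form per-value term ceil(n / max(1, v+1)) * (v+1); objective: simpler.

-- ===== PORT A =====
-- one step of A's loop body, on state (total_answer, d_answer)
def pvStepA (st : Int × PySem.Dict Int Int) (ans : Int) : Int × PySem.Dict Int Int :=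
  match st.2.get? ans with
  | none => (st.1 + (ans + 1), st.2.insert ans 1)          -- ans not in d_answer
  | some c =>
    if c < ans + 1 then (st.1, st.2.insert ans (c + 1))    -- d_answer[ans] += 1
    else (st.1 + (ans + 1), st.2.insert ans 1)

def min_attendees (answers : List Int) : Int :=
  (answers.foldl pvStepA (0, PySem.Dict.empty)).1

-- ===== PORT B =====
def min_attendees_alt (answers : List Int) : Int :=
  let counts := answers.foldl (fun (d : PySem.Dict Int Int) a => d.insert a (d.getD a 0 + 1)) PySem.Dict.empty
  counts.items.foldl
    (fun total p =>
      let cap := if p.1 + 1 > 1 then p.1 + 1 else 1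
      total + (PySem.Int.floordiv (p.2 + cap - 1) cap) * (p.1 + 1)) 0

-- ===== PRECONDITION & SPEC =====
def Spec_min_attendees (answers : List Int) (out : Int) : Prop := out = min_attendees_alt answers
instance (answers : List Int) (out : Int) : Decidable (Spec_min_attendees answers out) := by unfold Spec_min_attendees; infer_instance

-- ===== CLAIM (what is proved, stated in full; the proofs are below) =====
def Claim_equal_min_attendees : Prop := ∀ (answers : List Int), Dom_min_attendees answers → Spec_min_attendees answers (min_attendees answers)

-- ===== LEMMAS AND PROOFS =====

-- group capacity for answer v, as B computes it
def pvCap (v : Int) : Int := if v + 1 > 1 then v + 1 else 1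

-- B's per-value summand: ceil(n / cap) * (v + 1)
def pvG (v n : Int) : Int := (PySem.Int.floordiv (n + pvCap v - 1) (pvCap v)) * (v + 1)

-- residual group size A's dict stores for v after n >= 1 occurrences
def pvResid (v n : Int) : Int := PySem.Int.mod (n - 1) (pvCap v) + 1

lemma pvCap_pos (v : Int) : 0 < pvCap v := by
  unfold pvCap; split <;> omega

-- uniqueness of floor division / remainder for a positive divisor
lemma pvDivUniq (n b : Int) (hb : 0 < b) (q r : Int) (h : n = b * q + r)
    (h0 : 0 ≤ r) (h1 : r < b) : n / b = q ∧ n % b = r := by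
  subst h
  constructor
  · rw [add_comm, Int.add_mul_ediv_left _ _ (by omega : b ≠ 0), Int.ediv_eq_zero_of_lt h0 h1]
    ring
  · rw [Int.mul_add_emod_self_left, Int.emod_eq_of_lt h0 h1]

lemma pvG_eq (v n : Int) :
    pvG v n = (PySem.Int.floordiv (n - 1) (pvCap v) + 1) * (v + 1) := by
  have hc := pvCap_pos v
  unfold pvG
  rw [PySem.Int.floordiv_eq_ediv_of_pos hc, PySem.Int.floordiv_eq_ediv_of_pos hc]
  have h : n + pvCap v - 1 = (n - 1) + 1 * pvCap v := by ring
  rw [h, Int.add_mul_ediv_right _ _ (by omega : pvCap v ≠ 0)]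

-- the two division facts behind A's branch test
lemma pvStep_div (v n : Int) :
    (pvResid v n < pvCap v →
      PySem.Int.mod n (pvCap v) = pvResid v n ∧
      PySem.Int.floordiv n (pvCap v) = PySem.Int.floordiv (n - 1) (pvCap v)) ∧
    (¬ pvResid v n < pvCap v →
      PySem.Int.mod n (pvCap v) = 0 ∧
      PySem.Int.floordiv n (pvCap v) = PySem.Int.floordiv (n - 1) (pvCap v) + 1) := by
  have hc := pvCap_pos v
  have hlt := PySem.Int.mod_lt (n - 1) hc
  have hge := PySem.Int.mod_nonneg (n - 1) hc
  have hdm := PySem.Int.floordiv_mul_add_mod (n - 1) (pvCap v)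
  unfold pvResid
  simp only [PySem.Int.mod_eq_emod_of_pos hc, PySem.Int.floordiv_eq_ediv_of_pos hc] at *
  constructor
  · intro h
    have he : n = pvCap v * ((n - 1) / pvCap v) + ((n - 1) % pvCap v + 1) := by
      rw [mul_comm]; omega
    have h2 := pvDivUniq n (pvCap v) hc _ _ he (by omega) (by omega)
    exact ⟨h2.2, h2.1⟩
  · intro h
    have he : n = pvCap v * ((n - 1) / pvCap v + 1) + 0 := by
      rw [mul_comm, add_mul, one_mul]; omega
    have h2 := pvDivUniq n (pvCap v) hc _ _ he (by omega) (by omega)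
    exact ⟨h2.2, h2.1⟩

-- updating the summand at one element of a nodup list shifts the sum by the difference there
lemma sum_map_update {l : List Int} (f g : Int → Int) (hnd : l.Nodup) {x : Int} (hx : x ∈ l)
    (hoff : ∀ v ∈ l, v ≠ x → f v = g v) :
    (l.map f).sum = (l.map g).sum + (f x - g x) := by
  induction l with
  | nil => cases hx
  | cons a t ih =>
    simp only [List.map_cons, List.sum_cons]
    rcases List.mem_cons.mp hx with rfl | hxt
    · have h : ∀ v ∈ t, f v = g v := fun v hv =>
        hoff v (List.mem_cons_of_mem _ hv) (fun h => (List.nodup_cons.mp hnd).1 (h ▸ hv))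
      rw [List.map_congr_left h]; ring
    · have ha : f a = g a := hoff a (List.mem_cons_self) (fun h => (List.nodup_cons.mp hnd).1 (h ▸ hxt))
      rw [ha, ih (List.nodup_cons.mp hnd).2 hxt
            (fun v hv hne => hoff v (List.mem_cons_of_mem _ hv) hne)]
      ring

-- the loop invariant of A: total equals B's closed-form sum over the seen values, and the
-- dict stores the residual partial-group size of every seen value
lemma pvStepA_none (st : Int × PySem.Dict Int Int) (ans : Int) (h : st.2.get? ans = none) :
    pvStepA st ans = (st.1 + (ans + 1), st.2.insert ans 1) := by
  unfold pvStepA; rw [h]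

lemma pvStepA_some (st : Int × PySem.Dict Int Int) (ans c : Int) (h : st.2.get? ans = some c) :
    pvStepA st ans = if c < ans + 1 then (st.1, st.2.insert ans (c + 1))
                     else (st.1 + (ans + 1), st.2.insert ans 1) := by
  unfold pvStepA; rw [h]

lemma pvInvariant (xs : List Int) :
    (xs.foldl pvStepA (0, PySem.Dict.empty)).1
        = ((PySem.Set.ofList xs).map (fun v => pvG v (xs.count v))).sum ∧
    ∀ v : Int, (xs.foldl pvStepA (0, PySem.Dict.empty)).2.get? v
        = if xs.count v = 0 then none else some (pvResid v (xs.count v)) := by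
  induction xs using List.reverseRecOn with
  | nil => simp [PySem.Set.ofList, PySem.Dict.get?_empty]
  | append_singleton t x ih =>
    obtain ⟨ih1, ih2⟩ := ih
    rw [List.foldl_append] at *
    simp only [List.foldl_cons, List.foldl_nil]
    set st := List.foldl pvStepA (0, PySem.Dict.empty) t with hst
    by_cases hmem : x ∈ t
    · -- x seen before: t.count x >= 1
      have hcnt : t.count x ≠ 0 := fun h => (List.count_eq_zero.mp h) hmem
      have hn1 : 1 ≤ (t.count x : Int) := by exact_mod_cast Nat.one_le_iff_ne_zero.mpr hcnt
      have hget := ih2 x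
      rw [if_neg hcnt] at hget
      have hset : PySem.Set.ofList (t ++ [x]) = PySem.Set.ofList t := by
        rw [PySem.Set.ofList_eq_foldl, List.foldl_append, ← PySem.Set.ofList_eq_foldl]
        simp only [List.foldl_cons, List.foldl_nil]
        unfold PySem.Set.add
        rw [if_pos (by simp [PySem.Set.contains, PySem.Set.mem_ofList, hmem])]
      have hdiv := pvStep_div x (t.count x)
      have hcount_new : ((t ++ [x]).count x : Int) = (t.count x : Int) + 1 := by
        simp [List.count_append]
      have hn1' : 1 ≤ ((t ++ [x]).count x : Int) := by rw [hcount_new]; omega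
      have hcount_ne : ∀ v : Int, v ≠ x → (t ++ [x]).count v = t.count v := by
        intro v hv
        simp [List.count_append, Ne.symm hv]
      have hnodup : (PySem.Set.ofList t).Nodup := PySem.Set.nodup_ofList t
      have hmem' : x ∈ PySem.Set.ofList t := (PySem.Set.mem_ofList t x).mpr hmem
      have hsum := sum_map_update (fun v => pvG v ((t ++ [x]).count v))
        (fun v => pvG v (t.count v)) hnodup hmem'
        (fun v _ hv => by simp only [hcount_ne v hv])
      beta_reduce at hsum
      have hmodnn := PySem.Int.mod_nonneg ((t.count x : Int) - 1) (pvCap_pos x)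
      rw [pvStepA_some st x _ hget]
      by_cases hlt : pvResid x (t.count x) < x + 1
      · -- fills the current group further; total unchanged
        have hlt' : pvResid x (t.count x) < pvCap x := by
          unfold pvCap; split
          · exact hlt
          · unfold pvResid at hlt ⊢; omega
        obtain ⟨hm, hd⟩ := hdiv.1 hlt'
        rw [if_pos hlt]
        constructor
        · show st.1 = _
          rw [hset, ih1, hsum]
          have h : pvG x ((t ++ [x]).count x) = pvG x (t.count x) := by
            rw [pvG_eq, pvG_eq, hcount_new,
                show (t.count x : Int) + 1 - 1 = (t.count x : Int) by ring, hd]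
          rw [h]; ring
        · intro v
          show (st.2.insert x (pvResid x (t.count x) + 1)).get? v = _
          by_cases hvx : v = x
          · subst hvx
            rw [PySem.Dict.get?_insert_self, if_neg (by simp [List.count_append])]
            have hres : pvResid v ((t ++ [v]).count v : Int) = pvResid v (t.count v : Int) + 1 := by
              have hm' := hm
              unfold pvResid at hm' ⊢
              rw [hcount_new, show (t.count v : Int) + 1 - 1 = (t.count v : Int) by ring]
              omega
            rw [hres]
          · rw [PySem.Dict.get?_insert_of_ne _ _ hvx, ih2 v, hcount_ne v hvx]
      · -- opens a fresh group; total += x + 1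
        obtain ⟨hm, hd⟩ := hdiv.2 (by
          intro h
          apply hlt
          unfold pvCap at h
          split at h
          · exact h
          · unfold pvResid at h; omega)
        rw [if_neg hlt]
        constructor
        · show st.1 + (x + 1) = _
          rw [hset, ih1, hsum]
          have h : pvG x ((t ++ [x]).count x) = pvG x (t.count x) + (x + 1) := by
            rw [pvG_eq, pvG_eq, hcount_new,
                show (t.count x : Int) + 1 - 1 = (t.count x : Int) by ring, hd]
            ring
          rw [h]; ring
        · intro v
          show (st.2.insert x 1).get? v = _
          by_cases hvx : v = x
          · subst hvx
            rw [PySem.Dict.get?_insert_self, if_neg (by simp [List.count_append])]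
            have hres : pvResid v ((t ++ [v]).count v : Int) = 1 := by
              unfold pvResid
              rw [hcount_new, show (t.count v : Int) + 1 - 1 = (t.count v : Int) by ring]
              have hm' := hm
              unfold pvResid at hm'
              omega
            rw [hres]
          · rw [PySem.Dict.get?_insert_of_ne _ _ hvx, ih2 v, hcount_ne v hvx]
    · -- first occurrence of x
      have hcnt : t.count x = 0 := List.count_eq_zero.mpr hmem
      have hget := ih2 x
      rw [if_pos hcnt] at hget
      have hset : PySem.Set.ofList (t ++ [x]) = PySem.Set.ofList t ++ [x] := by
        rw [PySem.Set.ofList_eq_foldl, List.foldl_append, ← PySem.Set.ofList_eq_foldl]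
        simp only [List.foldl_cons, List.foldl_nil]
        unfold PySem.Set.add
        rw [if_neg (by simp [PySem.Set.contains, PySem.Set.mem_ofList, hmem])]
      have hc1 : (t ++ [x]).count x = 1 := by simp [List.count_append, hcnt]
      rw [pvStepA_none st x hget]
      constructor
      · show st.1 + (x + 1) = _
        rw [hset, ih1]
        simp only [List.map_append, List.sum_append, List.map_cons, List.map_nil,
                   List.sum_cons, List.sum_nil]
        have hG1 : pvG x ((t ++ [x]).count x) = x + 1 := by
          rw [hc1, pvG_eq, PySem.Int.floordiv_eq_ediv_of_pos (pvCap_pos x)]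
          norm_num
        have h : (PySem.Set.ofList t).map (fun v => pvG v ((t ++ [x]).count v))
               = (PySem.Set.ofList t).map (fun v => pvG v (t.count v)) := by
          apply List.map_congr_left
          intro v hv
          have hvx : v ≠ x := fun h => hmem (h ▸ (PySem.Set.mem_ofList t v).mp hv)
          simp only [show (t ++ [x]).count v = t.count v by
                simp [List.count_append, Ne.symm hvx]]
        rw [hG1, h]; ring
      · intro v
        show (st.2.insert x 1).get? v = _
        by_cases hvx : v = x
        · subst hvx
          rw [PySem.Dict.get?_insert_self, if_neg (by simp [List.count_append]), hc1]
          simp [pvResid, PySem.Int.mod_eq_emod_of_pos (pvCap_pos v)]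
        · rw [PySem.Dict.get?_insert_of_ne _ _ hvx, ih2 v,
              show (t ++ [x]).count v = t.count v by
                simp [List.count_append, Ne.symm hvx]]

-- B's fold over the counter items is the same closed-form sum
lemma pvB_eq (xs : List Int) :
    min_attendees_alt xs = ((PySem.Set.ofList xs).map (fun v => pvG v (xs.count v))).sum := by
  unfold min_attendees_alt
  rw [PySem.Dict.foldl_insert_getD_add_one_eq_counter]
  show List.foldl (fun total p =>
      total + (PySem.Int.floordiv (p.2 + (if p.1 + 1 > 1 then p.1 + 1 else 1) - 1)
        (if p.1 + 1 > 1 then p.1 + 1 else 1)) * (p.1 + 1)) 0 (PySem.Dict.counter xs).items = _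
  rw [PySem.Dict.items_counter,
      PySem.List.foldl_add (g := fun p : Int × Int =>
        (PySem.Int.floordiv (p.2 + (if p.1 + 1 > 1 then p.1 + 1 else 1) - 1)
          (if p.1 + 1 > 1 then p.1 + 1 else 1)) * (p.1 + 1))]
  simp only [List.map_map, zero_add]
  rfl

-- ===== VERDICT (by name: the statement is the Claim_ definition above) =====
theorem min_attendees_spec : Claim_equal_min_attendees := by
  intro answers _
  unfold Spec_min_attendees min_attendees
  rw [pvB_eq, (pvInvariant answers).1]
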